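-- pv_equiv track=rewrite | github.com/0xbeedao/agent-arena | src/agentarena/core/services/uuid_service.py | encode_arbitrary_base
-- ===== SOURCE A (Python) =====
-- def encode_arbitrary_base(number, words):
--     """Encodes an integer using the specified list of words as the arbitrary base."""
--     if number < 0:
--         raise ValueError("Number must be non-negative")
--
--     base = len(words)
--     result = []
--
--     while number > 0:
--         remainder = number % base
--         result.append(words[remainder])
--         number = number // base
--
--     result.reverse()
--     return "-".join(result) if result else words[0]
-- ===== SOURCE B (Python) =====
-- def encode_arbitrary_base(number, words):
--     """Encodes an integer using the specified list of words as the arbitrary base."""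
--     if number < 0:
--         raise ValueError("Number must be non-negative")
--     if number == 0:
--         return words[0]
--     base = len(words)
--     p = 1
--     while p * base <= number:
--         p *= base
--     parts = []
--     while p > 0:
--         parts.append(words[(number // p) % base])
--         p //= base
--     return "-".join(parts)
-- ===== Notes on version B (the rewrite author's own statement) =====
-- stated objective: alternative
-- what changed: B emits digits most-significant-first by first finding the largest power of the base not exceeding the number, then reading digits top-down with number//p % base, instead of A's divide-and-append loop followed by reverse().
import Mathlib
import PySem

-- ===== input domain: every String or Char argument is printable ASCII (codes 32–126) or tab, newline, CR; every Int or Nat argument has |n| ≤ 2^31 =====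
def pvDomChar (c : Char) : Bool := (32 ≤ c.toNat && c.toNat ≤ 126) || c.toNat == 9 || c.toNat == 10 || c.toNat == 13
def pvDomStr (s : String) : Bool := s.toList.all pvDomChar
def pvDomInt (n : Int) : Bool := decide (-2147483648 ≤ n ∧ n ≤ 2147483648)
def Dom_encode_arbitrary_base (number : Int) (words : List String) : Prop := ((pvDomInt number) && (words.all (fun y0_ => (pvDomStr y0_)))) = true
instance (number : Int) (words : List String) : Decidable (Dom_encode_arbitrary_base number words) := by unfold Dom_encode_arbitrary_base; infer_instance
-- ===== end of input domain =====

-- B emits digits most-significant-first via the largest power of the base, instead of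
-- A's least-significant-first divide loop followed by reverse(); objective: alternative.

-- ===== PORT A =====
-- while number > 0: result.append(words[number % base]); number //= base
def encA_loop (words : List String) (base : Int) : Nat → Int → List String → List String
  | 0, _, result => result                  -- fuel exhausted (never inside Pre_)
  | fuel + 1, number, result =>
    if number > 0 then
      encA_loop words base fuel (PySem.Int.floordiv number base)
        (result ++ [(PySem.List.pyGet? words (PySem.Int.mod number base)).getD ""])
    else result

def encode_arbitrary_base (number : Int) (words : List String) : String :=
  if number < 0 then ""   -- Python raises ValueError here; excluded by Pre_
  else
    let base : Int := (words.length : Int)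
    let result := (encA_loop words base (number.toNat + 1) number []).reverse
    if result.isEmpty then (PySem.List.pyGet? words 0).getD "" else PySem.Str.join "-" result

-- ===== PORT B =====
-- while p * base <= number: p *= base
def encB_grow (number base : Int) : Nat → Int → Int
  | 0, p => p                               -- fuel exhausted (never inside Pre_)
  | fuel + 1, p => if p * base ≤ number then encB_grow number base fuel (p * base) else p

-- while p > 0: parts.append(words[(number // p) % base]); p //= base
def encB_emit (words : List String) (number base : Int) : Nat → Int → List String → List String
  | 0, _, parts => parts                    -- fuel exhausted (never inside Pre_)
  | fuel + 1, p, parts =>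
    if p > 0 then
      encB_emit words number base fuel (PySem.Int.floordiv p base)
        (parts ++ [(PySem.List.pyGet? words
          (PySem.Int.mod (PySem.Int.floordiv number p) base)).getD ""])
    else parts

def encode_arbitrary_base_alt (number : Int) (words : List String) : String :=
  if number < 0 then ""   -- Python raises ValueError here; excluded by Pre_
  else if number = 0 then (PySem.List.pyGet? words 0).getD ""
  else
    let base : Int := (words.length : Int)
    let p := encB_grow number base (number.toNat + 1) 1
    PySem.Str.join "-" (encB_emit words number base (number.toNat + 1) p [])

-- ===== PRECONDITION & SPEC =====
-- Pre_ excludes exactly the inputs on which A does not return: number < 0 (ValueError),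
-- number = 0 with words = [] (IndexError), number > 0 with words = [] (ZeroDivisionError)
-- or with a single word (infinite loop, base 1).
def Pre_encode_arbitrary_base (number : Int) (words : List String) : Prop :=
  0 ≤ number ∧ (number = 0 → words ≠ []) ∧ (0 < number → 2 ≤ (words.length : Int))
instance (number : Int) (words : List String) : Decidable (Pre_encode_arbitrary_base number words) := by
  unfold Pre_encode_arbitrary_base; infer_instance

def pvWitness_encode_arbitrary_base : Int × List String := (5, ["a", "b"])

def Spec_encode_arbitrary_base (number : Int) (words : List String) (out : String) : Prop :=
  out = encode_arbitrary_base_alt number words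
instance (number : Int) (words : List String) (out : String) : Decidable (Spec_encode_arbitrary_base number words out) := by
  unfold Spec_encode_arbitrary_base; infer_instance

-- ===== CLAIM (what is proved, stated in full; the proofs are below) =====
def Claim_equal_encode_arbitrary_base : Prop := ∀ (number : Int) (words : List String), Dom_encode_arbitrary_base number words → Pre_encode_arbitrary_base number words → Spec_encode_arbitrary_base number words (encode_arbitrary_base number words)

-- ===== LEMMAS AND PROOFS =====

-- the (LSB-first) digit-word list A builds, as a well-founded recursion
def digA (words : List String) (base : Int) (n : Int) : List String :=
  if h : 0 < n ∧ 2 ≤ base then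
    (PySem.List.pyGet? words (PySem.Int.mod n base)).getD "" ::
      digA words base (PySem.Int.floordiv n base)
  else []
termination_by n.toNat
decreasing_by
  rw [PySem.Int.floordiv_eq_ediv_of_pos (by omega)]
  have h1 : n / base < n := by
    rw [Int.ediv_lt_iff_lt_mul (by omega)]; nlinarith [h.1, h.2]
  have h2 : 0 ≤ n / base := Int.ediv_nonneg (by omega) (by omega)
  omega

-- the (MSB-first) digit-word list B builds, indexed by the top power k
def Edig (words : List String) (base n : Int) : Nat → List String
  | 0 => [(PySem.List.pyGet? words (PySem.Int.mod n base)).getD ""]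
  | k + 1 => (PySem.List.pyGet? words
      (PySem.Int.mod (PySem.Int.floordiv n (base ^ (k + 1))) base)).getD ""
      :: Edig words base n k

theorem encA_loop_eq (words : List String) (base : Int) (hb : 2 ≤ base) :
    ∀ (fuel : Nat) (n : Int) (acc : List String), 0 ≤ n → n.toNat < fuel →
      encA_loop words base fuel n acc = acc ++ digA words base n := by
  intro fuel
  induction fuel with
  | zero => intro n acc hn hf; omega
  | succ f ih =>
    intro n acc hn hf
    by_cases h : n > 0
    · simp only [encA_loop, if_pos h]
      have hfd : PySem.Int.floordiv n base = n / base :=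
        PySem.Int.floordiv_eq_ediv_of_pos (by omega)
      have h1 : n / base < n := by
        rw [Int.ediv_lt_iff_lt_mul (by omega)]; nlinarith
      have h2 : 0 ≤ n / base := Int.ediv_nonneg (by omega) (by omega)
      rw [ih _ _ (by rw [hfd]; exact h2) (by rw [hfd]; omega)]
      conv_rhs => rw [digA, dif_pos ⟨h, hb⟩]
      simp
    · simp only [encA_loop, if_neg h]
      rw [digA, dif_neg (by tauto)]
      simp

theorem encB_grow_spec (n base : Int) (hb : 2 ≤ base) (hn : 0 < n) :
    ∀ (fuel : Nat) (p : Int), 1 ≤ p → p ≤ n → (∃ k : Nat, p = base ^ k) →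
      n.toNat + 1 - p.toNat ≤ fuel →
      ∃ k : Nat, encB_grow n base fuel p = base ^ k ∧ base ^ k ≤ n ∧ n < base ^ (k + 1) := by
  intro fuel
  induction fuel with
  | zero => intro p hp1 hpn _ hf; omega
  | succ f ih =>
    intro p hp1 hpn hk hf
    simp only [encB_grow]
    by_cases h : p * base ≤ n
    · rw [if_pos h]
      obtain ⟨k, hk⟩ := hk
      have hpb : p + 1 ≤ p * base := by nlinarith
      refine ih (p * base) (by nlinarith) h ⟨k + 1, by rw [hk, pow_succ]⟩ ?_
      omega
    · rw [if_neg h]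
      obtain ⟨k, hk⟩ := hk
      exact ⟨k, hk, by omega, by rw [pow_succ, ← hk]; omega⟩

theorem encB_emit_zero (words : List String) (n base : Int) :
    ∀ (fuel : Nat) (parts : List String), encB_emit words n base fuel 0 parts = parts := by
  intro fuel parts; cases fuel <;> simp [encB_emit]

theorem encB_emit_eq (words : List String) (n base : Int) (hb : 2 ≤ base) (_hn : 0 ≤ n) :
    ∀ (k fuel : Nat) (parts : List String), k + 1 ≤ fuel →
      encB_emit words n base fuel (base ^ k) parts = parts ++ Edig words base n k := by
  intro k
  induction k with
  | zero =>
    intro fuel parts hf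
    obtain ⟨f, rfl⟩ : ∃ f, fuel = f + 1 := ⟨fuel - 1, by omega⟩
    simp only [encB_emit, pow_zero]
    rw [if_pos (by omega : (1:Int) > 0)]
    have hd1 : PySem.Int.floordiv (1:Int) base = 0 := by
      rw [PySem.Int.floordiv_eq_ediv_of_pos (by omega)]
      exact Int.ediv_eq_zero_of_lt (by omega) (by omega)
    have hdn : PySem.Int.floordiv n (1:Int) = n := by
      rw [PySem.Int.floordiv_eq_ediv_of_pos (by omega)]
      exact Int.ediv_one n
    rw [hd1, hdn, encB_emit_zero]
    simp [Edig]
  | succ k ih =>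
    intro fuel parts hf
    obtain ⟨f, rfl⟩ : ∃ f, fuel = f + 1 := ⟨fuel - 1, by omega⟩
    have hbp : (0:Int) < base ^ (k + 1) := pow_pos (by omega) _
    simp only [encB_emit]
    rw [if_pos (by omega : base ^ (k + 1) > 0)]
    have hstep : PySem.Int.floordiv (base ^ (k + 1)) base = base ^ k := by
      rw [PySem.Int.floordiv_eq_ediv_of_pos (by omega), pow_succ]
      exact Int.mul_ediv_cancel _ (by omega)
    rw [hstep, ih f _ (by omega)]
    simp [Edig]

theorem Edig_succ_append (words : List String) (base : Int) (hb : 2 ≤ base) :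
    ∀ (k : Nat) (n : Int), 0 ≤ n →
      Edig words base n (k + 1) =
        Edig words base (PySem.Int.floordiv n base) k ++
          [(PySem.List.pyGet? words (PySem.Int.mod n base)).getD ""] := by
  intro k
  induction k with
  | zero =>
    intro n hn
    simp [Edig, pow_one]
  | succ k ih =>
    intro n hn
    have hb0 : (0:Int) < base := by omega
    have hdd : PySem.Int.floordiv (PySem.Int.floordiv n base) (base ^ (k + 1)) =
        PySem.Int.floordiv n (base ^ (k + 1 + 1)) := by
      rw [PySem.Int.floordiv_eq_ediv_of_pos hb0,
          PySem.Int.floordiv_eq_ediv_of_pos (pow_pos hb0 _),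
          PySem.Int.floordiv_eq_ediv_of_pos (pow_pos hb0 _),
          Int.ediv_ediv_of_nonneg (by omega), ← pow_succ']
    have hih := ih n hn
    simp only [Edig] at hih ⊢
    rw [hih, hdd]
    simp

theorem Edig_eq_reverse_digA (words : List String) (base : Int) (hb : 2 ≤ base) :
    ∀ (k : Nat) (n : Int), base ^ k ≤ n → n < base ^ (k + 1) →
      Edig words base n k = (digA words base n).reverse := by
  intro k
  induction k with
  | zero =>
    intro n h1 h2
    rw [pow_zero] at h1
    rw [pow_one] at h2
    rw [digA, dif_pos ⟨by omega, hb⟩]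
    have hz : PySem.Int.floordiv n base = 0 := by
      rw [PySem.Int.floordiv_eq_ediv_of_pos (by omega)]
      exact Int.ediv_eq_zero_of_lt (by omega) h2
    rw [hz, digA, dif_neg (by simp)]
    simp [Edig]
  | succ k ih =>
    intro n h1 h2
    have hb0 : (0:Int) < base := by omega
    have hn0 : (0:Int) < n := lt_of_lt_of_le (pow_pos hb0 _) h1
    have hfd : PySem.Int.floordiv n base = n / base :=
      PySem.Int.floordiv_eq_ediv_of_pos hb0
    have hlo : base ^ k ≤ n / base := by
      rw [Int.le_ediv_iff_mul_le hb0, ← pow_succ]; exact h1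
    have hhi : n / base < base ^ (k + 1) := by
      rw [Int.ediv_lt_iff_lt_mul hb0, ← pow_succ]; exact h2
    rw [Edig_succ_append words base hb k n (by omega)]
    rw [hfd, ih (n / base) hlo hhi]
    conv_rhs => rw [digA, dif_pos ⟨hn0, hb⟩]
    rw [hfd]
    simp

-- ===== VERDICT (by name: the statement is the Claim_ definition above) =====
theorem encode_arbitrary_base_spec : Claim_equal_encode_arbitrary_base := by
  intro number words _hdom hpre
  obtain ⟨hn0, _hz, hpos⟩ := hpre
  unfold Spec_encode_arbitrary_base encode_arbitrary_base encode_arbitrary_base_alt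
  rw [if_neg (show ¬ number < 0 by omega), if_neg (show ¬ number < 0 by omega)]
  by_cases h0 : number = 0
  · subst h0
    rw [if_pos rfl]
    simp [encA_loop]
  · rw [if_neg h0]
    have hn : 0 < number := by omega
    have hb : 2 ≤ ((words.length : Int)) := hpos hn
    dsimp only
    rw [encA_loop_eq words _ hb _ _ [] hn0 (by omega)]
    obtain ⟨k, hq, hk1, hk2⟩ :=
      encB_grow_spec number _ hb hn (number.toNat + 1) 1 le_rfl (by omega)
        ⟨0, (pow_zero _).symm⟩ (by omega)
    rw [hq]
    have h2k : ((2:Int)) ^ k ≤ ((words.length : Int)) ^ k :=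
      pow_le_pow_left₀ (by omega) (by omega) k
    have hklt : ((k : Int)) < (2:Int) ^ k := by
      have := Nat.lt_two_pow_self (n := k)
      exact_mod_cast this
    have hkfuel : k + 1 ≤ number.toNat + 1 := by
      have : ((k : Int)) < number := by
        calc ((k : Int)) < (2:Int) ^ k := hklt
          _ ≤ ((words.length : Int)) ^ k := h2k
          _ ≤ number := hk1
      omega
    rw [encB_emit_eq words number _ hb hn0 k (number.toNat + 1) [] hkfuel]
    rw [Edig_eq_reverse_digA words _ hb k number hk1 hk2]
    have hne : digA words ((words.length : Int)) number ≠ [] := by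
      rw [digA, dif_pos ⟨hn, hb⟩]; simp
    simp [hne]
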